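-- pv_equiv track=rewrite | github.com/Persie0/VSVO-Algorithms | scripts/BullyAlgorithm.py | bully_election
-- ===== SOURCE A (Python) =====
-- def bully_election(processes: list[int], alive: list[bool], initiator: int) -> tuple[int, list[str]]:
--     """
--     Simulate the Bully algorithm.
--
--     Args:
--         processes: List of process IDs (sorted ascending).
--         alive: List of booleans indicating if each process is alive.
--         initiator: The process ID that initiates the election.
--
--     Returns:
--         Tuple of (elected_coordinator, list_of_steps).
--     """
--     steps = []
--     n = len(processes)
--     process_set = set(processes)
--     alive_map = {processes[i]: alive[i] for i in range(n)}
--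
--     if initiator not in process_set:
--         return -1, [f"Error: Initiator {initiator} not in process list."]
--
--     if not alive_map[initiator]:
--         return -1, [f"Error: Initiator {initiator} is crashed and cannot start election."]
--
--     # Track which processes are currently running an election
--     election_queue = [initiator]
--     processed = set()
--
--     while election_queue:
--         current = election_queue.pop(0)
--         if current in processed:
--             continue
--         processed.add(current)
--
--         steps.append(f"Process {current} starts election.")
--
--         # Send ELECTION to all higher-ID processes
--         higher = [p for p in processes if p > current and alive_map[p]]
--
--         if not higher:
--             # No higher process alive -> current wins
--             steps.append(f"Process {current} receives no OK responses.")
--             steps.append(f"Process {current} becomes COORDINATOR and broadcasts to all.")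
--             return current, steps
--         else:
--             steps.append(f"Process {current} sends ELECTION to: {higher}")
--             # Higher processes respond with OK
--             for h in higher:
--                 steps.append(f"Process {h} responds OK to {current}.")
--             # The highest alive process takes over
--             steps.append(f"Process {current} waits (a higher process will take over).")
--             # Add highest to queue
--             election_queue.append(max(higher))
--
--     return -1, steps
-- ===== SOURCE B (Python) =====
-- def bully_election(processes: list[int], alive: list[bool], initiator: int) -> tuple[int, list[str]]:
--     """Straight-line two-phase Bully election: no queue/processed machinery.
--
--     After the guards, the initiator either wins immediately (no higher alive
--     process) or the highest alive process above it wins in the next round.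
--     """
--     alive_map = dict(zip(processes, alive))
--
--     if initiator not in alive_map:
--         return -1, [f"Error: Initiator {initiator} not in process list."]
--     if not alive_map[initiator]:
--         return -1, [f"Error: Initiator {initiator} is crashed and cannot start election."]
--
--     def finale(c, steps):
--         return c, steps + [
--             f"Process {c} starts election.",
--             f"Process {c} receives no OK responses.",
--             f"Process {c} becomes COORDINATOR and broadcasts to all.",
--         ]
--
--     higher = [p for p in processes if p > initiator and alive_map[p]]
--     if not higher:
--         return finale(initiator, [])
--
--     steps = [
--         f"Process {initiator} starts election.",
--         f"Process {initiator} sends ELECTION to: {higher}",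
--     ]
--     steps += [f"Process {h} responds OK to {initiator}." for h in higher]
--     steps.append(f"Process {initiator} waits (a higher process will take over).")
--     return finale(max(higher), steps)
-- ===== Notes on version B (the rewrite author's own statement) =====
-- stated objective: simpler
-- what changed: Replaced the while-loop/queue/processed-set election machinery with straight-line two-phase code: compute the higher alive list once, emit the initiator's steps, and the winner (max of that list, or the initiator) emits the closing three steps via one shared helper.
-- outside the precondition, e.g. on bully_election([1, 2], [True], 1): A raises IndexError, B raises KeyError
import Mathlib
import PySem

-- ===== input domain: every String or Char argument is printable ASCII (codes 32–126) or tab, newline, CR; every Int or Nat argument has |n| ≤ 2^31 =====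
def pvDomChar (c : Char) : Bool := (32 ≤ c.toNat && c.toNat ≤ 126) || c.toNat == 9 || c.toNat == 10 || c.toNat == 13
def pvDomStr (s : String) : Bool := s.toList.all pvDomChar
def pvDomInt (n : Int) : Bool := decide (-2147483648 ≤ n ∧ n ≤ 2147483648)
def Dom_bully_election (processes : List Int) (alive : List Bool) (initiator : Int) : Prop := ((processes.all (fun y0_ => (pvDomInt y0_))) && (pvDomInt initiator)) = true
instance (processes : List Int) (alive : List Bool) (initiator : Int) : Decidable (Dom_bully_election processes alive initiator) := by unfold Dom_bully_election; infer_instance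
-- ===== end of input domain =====

-- B replaces A's while-loop/queue/processed-set election machinery with straight-line
-- two-phase code (objective: simpler; same exact step strings and winner).

-- ===== PORT A =====

-- f"{higher}": Python's repr of an int list, used verbatim by both Pythons' f-strings
def pvListRepr (xs : List Int) : String :=
  "[" ++ String.intercalate ", " (xs.map PySem.Int.toStr) ++ "]"

-- the 'while election_queue:' loop of A; fuel only makes the recursion total
def bullyLoop (processes : List Int) (aliveMap : PySem.Dict Int Bool) :
    Nat → List Int → PySem.Set Int → List String → Int × List String
  | 0, _, _, steps => (-1, steps)
  | _ + 1, [], _, steps => (-1, steps)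
  | fuel + 1, current :: rest, processed, steps =>
    if PySem.Set.contains processed current then
      bullyLoop processes aliveMap fuel rest processed steps
    else
      let processed := PySem.Set.add processed current
      let steps := steps ++ ["Process " ++ PySem.Int.toStr current ++ " starts election."]
      let higher := processes.filter (fun p => decide (current < p) && aliveMap.getD p false)
      if higher.isEmpty then
        (current, steps ++
          ["Process " ++ PySem.Int.toStr current ++ " receives no OK responses.",
           "Process " ++ PySem.Int.toStr current ++ " becomes COORDINATOR and broadcasts to all."])
      else
        let steps := steps ++
          ["Process " ++ PySem.Int.toStr current ++ " sends ELECTION to: " ++ pvListRepr higher]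
        let steps := steps ++ higher.map (fun h =>
          "Process " ++ PySem.Int.toStr h ++ " responds OK to " ++ PySem.Int.toStr current ++ ".")
        let steps := steps ++
          ["Process " ++ PySem.Int.toStr current ++ " waits (a higher process will take over)."]
        bullyLoop processes aliveMap fuel (rest ++ [(PySem.List.max? higher (fun x => x)).getD 0])
          processed steps

def bully_election (processes : List Int) (alive : List Bool) (initiator : Int) : Int × List String :=
  let n := processes.length
  let processSet : PySem.Set Int := PySem.Set.ofList processes
  -- {processes[i]: alive[i] for i in range(n)}; getD is exact under Pre_ (indices in range)
  let aliveMap : PySem.Dict Int Bool := (List.range n).foldl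
    (fun d i => d.insert (processes.getD i 0) (alive.getD i false)) PySem.Dict.empty
  if ¬ (PySem.Set.contains processSet initiator) then
    (-1, ["Error: Initiator " ++ PySem.Int.toStr initiator ++ " not in process list."])
  else if aliveMap.getD initiator false = false then
    (-1, ["Error: Initiator " ++ PySem.Int.toStr initiator ++ " is crashed and cannot start election."])
  else
    bullyLoop processes aliveMap (n + 2) [initiator] PySem.Set.empty []

-- ===== PORT B =====

-- B's local helper 'finale': the winner's three closing steps
def bullyFinale (c : Int) (steps : List String) : Int × List String :=
  (c, steps ++
    ["Process " ++ PySem.Int.toStr c ++ " starts election.",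
     "Process " ++ PySem.Int.toStr c ++ " receives no OK responses.",
     "Process " ++ PySem.Int.toStr c ++ " becomes COORDINATOR and broadcasts to all."])

def bully_election_alt (processes : List Int) (alive : List Bool) (initiator : Int) : Int × List String :=
  let aliveMap : PySem.Dict Int Bool :=
    (processes.zip alive).foldl (fun d pa => d.insert pa.1 pa.2) PySem.Dict.empty
  if ¬ (aliveMap.contains initiator) then
    (-1, ["Error: Initiator " ++ PySem.Int.toStr initiator ++ " not in process list."])
  else if aliveMap.getD initiator false = false then
    (-1, ["Error: Initiator " ++ PySem.Int.toStr initiator ++ " is crashed and cannot start election."])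
  else
    let higher := processes.filter (fun p => decide (initiator < p) && aliveMap.getD p false)
    if higher.isEmpty then
      bullyFinale initiator []
    else
      let steps :=
        ["Process " ++ PySem.Int.toStr initiator ++ " starts election.",
         "Process " ++ PySem.Int.toStr initiator ++ " sends ELECTION to: " ++ pvListRepr higher]
      let steps := steps ++ higher.map (fun h =>
        "Process " ++ PySem.Int.toStr h ++ " responds OK to " ++ PySem.Int.toStr initiator ++ ".")
      let steps := steps ++
        ["Process " ++ PySem.Int.toStr initiator ++ " waits (a higher process will take over)."]
      bullyFinale ((PySem.List.max? higher (fun x => x)).getD 0) steps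

-- ===== PRECONDITION & SPEC =====
-- Pre_ excludes inputs with len(alive) < len(processes), on which A raises IndexError
-- while building alive_map.
def Pre_bully_election (processes : List Int) (alive : List Bool) (initiator : Int) : Prop :=
  processes.length ≤ alive.length
instance (processes : List Int) (alive : List Bool) (initiator : Int) :
    Decidable (Pre_bully_election processes alive initiator) := by
  unfold Pre_bully_election; infer_instance

def pvWitness_bully_election : List Int × List Bool × Int := ([1, 2, 3], [true, true, true], 1)

def Spec_bully_election (processes : List Int) (alive : List Bool) (initiator : Int)
    (out : Int × List String) : Prop := out = bully_election_alt processes alive initiator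
instance (processes : List Int) (alive : List Bool) (initiator : Int) (out : Int × List String) :
    Decidable (Spec_bully_election processes alive initiator out) := by
  unfold Spec_bully_election; infer_instance

-- ===== CLAIM (what is proved, stated in full; the proofs are below) =====
def Claim_equal_bully_election : Prop := ∀ (processes : List Int) (alive : List Bool) (initiator : Int), Dom_bully_election processes alive initiator → Pre_bully_election processes alive initiator → Spec_bully_election processes alive initiator (bully_election processes alive initiator)

-- ===== LEMMAS AND PROOFS =====

-- A's range-indexed dict comprehension builds the same dict as B's dict(zip(...))
theorem pvMap_eq (ps : List Int) (as : List Bool) (h : ps.length ≤ as.length)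
    (d : PySem.Dict Int Bool) :
    (List.range ps.length).foldl
        (fun d i => d.insert (ps.getD i 0) (as.getD i false)) d
      = (ps.zip as).foldl (fun d pa => d.insert pa.1 pa.2) d := by
  induction ps generalizing as d with
  | nil => simp
  | cons p ps ih =>
    cases as with
    | nil => simp at h
    | cons a as =>
      simp only [List.length_cons, List.range_succ_eq_map, List.foldl_cons, List.foldl_map,
        List.getD_cons_zero, List.getD_cons_succ, List.zip_cons_cons]
      exact ih as (by simpa using h) _

-- the zip-built dict's key set is exactly the processes list
theorem pvContains_eq (ps : List Int) (as : List Bool) (h : ps.length ≤ as.length) (k : Int) :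
    ((ps.zip as).foldl (fun d pa => d.insert pa.1 pa.2) PySem.Dict.empty).contains k
      = ps.contains k := by
  have hk : ((ps.zip as).foldl (fun d pa => d.insert pa.1 pa.2) PySem.Dict.empty).keys
      = PySem.Set.update (PySem.Dict.empty (κ := Int) (ν := Bool)).keys
          ((ps.zip as).map Prod.fst) := by
    exact PySem.Dict.keys_foldl_insert_key (key := Prod.fst) (f := fun _ pa => pa.2)
      (l := ps.zip as) (d := PySem.Dict.empty)
  rw [PySem.Dict.contains_eq_decide_mem_keys, hk, List.map_fst_zip h]
  simp [PySem.Set.update_nil_left, PySem.Set.mem_ofList, PySem.Dict.empty, List.contains_iff_mem]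

-- after the first round, nothing alive lies above the maximum responder
theorem pvHigher_empty (ps : List Int) (amap : PySem.Dict Int Bool) (c m : Int)
    (hm : PySem.List.max? (ps.filter (fun p => decide (c < p) && amap.getD p false))
        (fun x => x) = some m) :
    ps.filter (fun p => decide (m < p) && amap.getD p false) = [] := by
  have hmem := PySem.List.max?_mem hm
  have hmax := PySem.List.max?_isMax hm
  have hcm : c < m := by
    have h2 := (List.mem_filter.mp hmem).2
    simp only [Bool.and_eq_true, decide_eq_true_eq] at h2
    exact h2.1
  rw [List.filter_eq_nil_iff]
  intro p hp hcond
  simp only [Bool.and_eq_true, decide_eq_true_eq] at hcond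
  have hpmem : p ∈ ps.filter (fun p => decide (c < p) && amap.getD p false) := by
    rw [List.mem_filter]
    exact ⟨hp, by simp [hcond.2]; omega⟩
  have := hmax p hpmem
  simp at this
  omega

-- ===== VERDICT (by name: the statement is the Claim_ definition above) =====
theorem bully_election_spec : Claim_equal_bully_election := by
  intro ps as init _ hpre
  unfold Spec_bully_election
  simp only [bully_election, bully_election_alt, pvMap_eq ps as hpre]
  set amap := (ps.zip as).foldl (fun d pa => d.insert pa.1 pa.2) PySem.Dict.empty with hamap
  have hmem : PySem.Set.contains (PySem.Set.ofList ps) init = amap.contains init := by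
    rw [hamap, pvContains_eq ps as hpre]
    simp [PySem.Set.contains]
  rw [hmem]
  by_cases h1 : amap.contains init = true
  · simp only [h1, not_true, if_neg, if_false]
    by_cases h2 : amap.getD init false = false
    · simp [h2]
    · simp only [h2, if_false]
      set higher := ps.filter (fun p => decide (init < p) && amap.getD p false) with hh
      by_cases hemp : higher.isEmpty
      · -- no higher alive process: initiator wins in A's first iteration
        simp [bullyLoop, bullyFinale, PySem.Set.contains, hemp, ← hh]
      · -- otherwise the max responder wins in A's second iteration
        obtain ⟨m, hm⟩ : ∃ m, PySem.List.max? higher (fun x => x) = some m := by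
          cases hmx : PySem.List.max? higher (fun x => x) with
          | none => exact absurd ((PySem.List.max?_eq_none_iff _ _).mp hmx) (by
              simpa [List.isEmpty_iff] using hemp)
          | some m => exact ⟨m, rfl⟩
        have hcm : init < m := by
          have h3 := (List.mem_filter.mp (PySem.List.max?_mem hm)).2
          simp only [Bool.and_eq_true, decide_eq_true_eq] at h3
          exact h3.1
        have hne : (m == init) = false := by simp; omega
        have h2nd := pvHigher_empty ps amap init m (by rw [← hh]; exact hm)
        simp only [bullyLoop, bullyFinale, PySem.Set.contains, ← hh, hemp, hm,
          if_false, Bool.not_eq_true]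
        simp [bullyLoop, PySem.Set.contains, PySem.Set.add, PySem.Set.empty, hne,
          ← hh, h2nd, hm, List.isEmpty_nil]
        intro heq
        exact absurd heq (by omega)
  · simp [h1]
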